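-- pv_equiv track=rewrite | github.com/zhuwenzhen/algorithms-practice | Company/Lyft/DriveMode.py | allowDriveMode
-- ===== SOURCE A (Python) =====
-- def allowDriveMode(shifts, current_time):
--     driveSoFar = 0
--     lastDriveTime = 0
--     for start, end in shifts:
--         if start - lastDriveTime >= 8:
--             driveSoFar = end - start
--         else:
--             driveSoFar += end - start
--         lastDriveTime = end
--
--     return current_time - lastDriveTime >= 8 or driveSoFar < 12
-- ===== SOURCE B (Python) =====
-- def allowDriveMode(shifts, current_time):
--     # backward pass: only the trailing run of shifts (gaps < 8) matters
--     lastDriveTime = shifts[-1][1] if shifts else 0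
--     driveSoFar = 0
--     for i in range(len(shifts) - 1, -1, -1):
--         start, end = shifts[i]
--         driveSoFar += end - start
--         prev_end = shifts[i - 1][1] if i > 0 else 0
--         if start - prev_end >= 8:
--             break
--     return current_time - lastDriveTime >= 8 or driveSoFar < 12
-- ===== Notes on version B (the rewrite author's own statement) =====
-- stated objective: alternative
-- what changed: B replaces A's forward fold carrying (accumulator, lastDriveTime) state by a backward pass that reads the last shift's end directly and sums durations of the trailing run, breaking at the first gap >= 8.
import Mathlib
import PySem

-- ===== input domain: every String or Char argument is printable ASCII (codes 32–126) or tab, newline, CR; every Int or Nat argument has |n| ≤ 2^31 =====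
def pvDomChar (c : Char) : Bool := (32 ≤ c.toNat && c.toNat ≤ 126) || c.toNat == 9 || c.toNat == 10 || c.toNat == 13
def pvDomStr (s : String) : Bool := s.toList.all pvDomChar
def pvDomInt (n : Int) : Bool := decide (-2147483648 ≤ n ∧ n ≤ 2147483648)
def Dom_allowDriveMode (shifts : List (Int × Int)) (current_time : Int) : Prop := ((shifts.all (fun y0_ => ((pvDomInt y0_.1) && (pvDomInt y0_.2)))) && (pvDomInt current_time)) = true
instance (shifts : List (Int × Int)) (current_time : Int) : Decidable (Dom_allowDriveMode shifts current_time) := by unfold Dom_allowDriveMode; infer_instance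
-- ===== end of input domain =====

-- B computes the same answer by a backward pass: last shift's end plus the duration sum of
-- the trailing run of shifts whose gap to the previous end is < 8 (alternative decomposition).


-- ===== PORT A =====
def allowDriveMode (shifts : List (Int × Int)) (current_time : Int) : Bool :=
  let st := shifts.foldl
    (fun (acc : Int × Int) se =>
      let driveSoFar := if se.1 - acc.2 ≥ 8 then se.2 - se.1 else acc.1 + (se.2 - se.1)
      (driveSoFar, se.2))
    (0, 0)
  decide (current_time - st.2 ≥ 8 ∨ st.1 < 12)

-- ===== PORT B =====
-- the backward loop of Source B: each element paired with its previous shift's end (0 for index 0),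
-- reversed; sum durations until the gap condition breaks the loop
def backScan : List ((Int × Int) × Int) → Int
  | [] => 0
  | (se, pe) :: rest =>
      if se.1 - pe ≥ 8 then se.2 - se.1 else (se.2 - se.1) + backScan rest

def allowDriveMode_alt (shifts : List (Int × Int)) (current_time : Int) : Bool :=
  let lastDriveTime := match shifts.getLast? with
    | some se => se.2
    | none => 0
  let driveSoFar := backScan ((shifts.zip (0 :: shifts.map Prod.snd)).reverse)
  decide (current_time - lastDriveTime ≥ 8 ∨ driveSoFar < 12)

-- ===== PRECONDITION & SPEC =====
def Spec_allowDriveMode (shifts : List (Int × Int)) (current_time : Int) (out : Bool) : Prop := out = allowDriveMode_alt shifts current_time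
instance (shifts : List (Int × Int)) (current_time : Int) (out : Bool) : Decidable (Spec_allowDriveMode shifts current_time out) := by unfold Spec_allowDriveMode; infer_instance

-- ===== CLAIM (what is proved, stated in full; the proofs are below) =====
def Claim_equal_allowDriveMode : Prop := ∀ (shifts : List (Int × Int)) (current_time : Int), Dom_allowDriveMode shifts current_time → Spec_allowDriveMode shifts current_time (allowDriveMode shifts current_time)

-- ===== LEMMAS AND PROOFS =====

-- all gaps small = the backward loop never breaks
def noBreak : Int → List (Int × Int) → Bool
  | _, [] => true
  | pe, se :: rest => decide (se.1 - pe < 8) && noBreak se.2 rest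

def okAll (xs : List ((Int × Int) × Int)) : Bool := xs.all (fun p => decide (p.1.1 - p.2 < 8))

lemma backScan_append_one (xs : List ((Int × Int) × Int)) (se : Int × Int) (pe : Int) :
    backScan (xs ++ [(se, pe)]) = backScan xs + (if okAll xs then se.2 - se.1 else 0) := by
  induction xs with
  | nil =>
      simp only [List.nil_append, backScan, okAll, List.all_nil, if_true]
      split_ifs <;> ring
  | cons z zs ih =>
      simp only [List.cons_append, backScan]
      by_cases h : z.1.1 - z.2 ≥ 8
      · simp [h, okAll]
      · have h' : z.1.1 - z.2 < 8 := by omega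
        rw [if_neg h, if_neg h, ih]
        have hok : okAll (z :: zs) = okAll zs := by simp [okAll, h']
        rw [hok]
        by_cases hc : okAll zs = true
        · simp only [hc, if_true]; ring
        · simp only [hc, if_false, Bool.false_eq_true]; ring

lemma okAll_reverse (xs : List ((Int × Int) × Int)) : okAll xs.reverse = okAll xs := by
  simp [okAll, List.all_reverse]

lemma okAll_zip (l : List (Int × Int)) (pe : Int) :
    okAll (l.zip (pe :: l.map Prod.snd)) = noBreak pe l := by
  induction l generalizing pe with
  | nil => simp [okAll, noBreak]
  | cons se rest ih => simp [okAll, noBreak, List.zip, ← ih se.2, okAll]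

lemma getLast?_cons_getD_snd (x : Int × Int) (l : List (Int × Int)) (pe : Int) :
    (Option.map Prod.snd ((x :: l).getLast?)).getD pe
      = (Option.map Prod.snd l.getLast?).getD x.2 := by
  cases l with
  | nil => simp
  | cons y t =>
      rw [List.getLast?_cons_cons]
      cases h : (y :: t).getLast? with
      | none => simp [List.getLast?_eq_none_iff] at h
      | some a => simp

-- forward fold (A's loop) characterized by the backward scan (B's loop)
lemma fold_char (l : List (Int × Int)) (d pe : Int) :
    l.foldl
      (fun (acc : Int × Int) se =>
        let driveSoFar := if se.1 - acc.2 ≥ 8 then se.2 - se.1 else acc.1 + (se.2 - se.1)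
        (driveSoFar, se.2))
      (d, pe)
    = (backScan ((l.zip (pe :: l.map Prod.snd)).reverse) + (if noBreak pe l then d else 0),
       ((l.getLast?.map Prod.snd).getD pe)) := by
  induction l generalizing d pe with
  | nil => simp [backScan, noBreak]
  | cons se rest ih =>
      simp only [List.foldl_cons, List.map_cons, List.zip_cons_cons, List.reverse_cons, ih]
      rw [backScan_append_one, okAll_reverse, okAll_zip]
      simp only [Prod.mk.injEq]
      constructor
      · -- first component
        by_cases hg : se.1 - pe ≥ 8
        · have : ¬ (se.1 - pe < 8) := by omega
          simp [hg, noBreak, this]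
        · have h' : se.1 - pe < 8 := by omega
          simp [hg, noBreak, h']
          split_ifs <;> ring
      · exact (getLast?_cons_getD_snd se rest pe).symm

lemma getLast?_snd (l : List (Int × Int)) :
    (l.getLast?.map Prod.snd).getD 0 = (match l.getLast? with
      | some se => se.2
      | none => 0) := by
  cases h : l.getLast? <;> simp

-- ===== VERDICT (by name: the statement is the Claim_ definition above) =====
theorem allowDriveMode_spec : Claim_equal_allowDriveMode := by
  intro shifts current_time _
  unfold Spec_allowDriveMode allowDriveMode allowDriveMode_alt
  rw [fold_char]
  simp only [getLast?_snd]
  congr 2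
  split_ifs <;> simp
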